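-- pv_equiv track=rewrite | github.com/kimdasomxkimdasom/coding_test | programmers/deque_01.py | solution3
-- ===== SOURCE A (Python) =====
-- from math import ceil
--
-- def solution3(progresses, speeds):
--     # ceil((100 - 진도) / 속도)로 소요일수를 바로 계산 (while 루프 필요 없음)
--     # 예: ceil((100-93)/1)=7, ceil((100-30)/30)=ceil(2.33)=3, ceil((100-55)/5)=9
--     days = [ceil((100 - p) / s) for p, s in zip(progresses, speeds)]
--     # 예: days = [7, 3, 9]
--
--     # 그룹핑 로직은 풀이 1과 동일
--     result = [1]            # 첫 작업은 새 배포 그룹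
--     max_day = days[0]       # 기준 일수 = 첫 작업의 소요일수
--
--     for i in range(1, len(days)):  # 두 번째 작업부터 순회
--         if days[i] <= max_day:
--             result[-1] += 1  # 기준보다 빨리 끝남 → 같이 배포
--         else:
--             max_day = days[i]   # 기준 갱신
--             result.append(1)    # 새 배포 그룹
--
--     return result
-- ===== SOURCE B (Python) =====
-- from math import ceil
--
-- def solution3(progresses, speeds):
--     days = [ceil((100 - p) / s) for p, s in zip(progresses, speeds)]
--     # prefix-maximum table: running[i] = max(days[:i+1])
--     running = days[:1]
--     for d in days[1:]:
--         running.append(max(running[-1], d))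
--     # a new deployment group starts exactly where the running maximum strictly rises
--     starts = [i for i in range(len(running)) if i == 0 or running[i - 1] < running[i]]
--     bounds = starts + [len(days)]
--     return [b - a for a, b in zip(bounds, bounds[1:])]
-- ===== Notes on version B (the rewrite author's own statement) =====
-- stated objective: alternative
-- what changed: A interleaves grouping and max-tracking in one stateful branch-and-increment loop; B decomposes the task into three flat passes: build the prefix-maximum table, read group boundaries off its strict rises, and return differences of consecutive boundaries.
import Mathlib
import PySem

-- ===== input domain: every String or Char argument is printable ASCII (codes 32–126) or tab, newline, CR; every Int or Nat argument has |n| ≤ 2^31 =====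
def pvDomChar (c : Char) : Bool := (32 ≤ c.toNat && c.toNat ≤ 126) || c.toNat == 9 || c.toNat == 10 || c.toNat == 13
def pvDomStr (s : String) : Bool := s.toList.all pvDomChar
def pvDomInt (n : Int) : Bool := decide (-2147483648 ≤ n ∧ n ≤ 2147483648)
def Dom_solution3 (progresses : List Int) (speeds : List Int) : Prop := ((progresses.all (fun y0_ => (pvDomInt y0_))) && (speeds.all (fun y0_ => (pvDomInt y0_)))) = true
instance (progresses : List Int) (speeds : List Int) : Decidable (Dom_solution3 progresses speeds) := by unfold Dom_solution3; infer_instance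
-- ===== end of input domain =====

-- B decomposes A's single stateful grouping loop into three flat passes: prefix-maximum table, group starts at its strict rises, differences of consecutive boundaries (objective: alternative, same cost).

-- shared helper: math.ceil((100-p)/s); exact on Dom (|n| ≤ 2^31): float division then ceil equals -((-a)//s)
def pvCeilDiv (a b : Int) : Int := -(PySem.Int.floordiv (-a) b)

-- ===== PORT A =====
-- result[-1] += 1 on a Python list
def pvIncLast : List Int → List Int
  | [] => []
  | [x] => [x + 1]
  | x :: y :: xs => x :: pvIncLast (y :: xs)

def solution3 (progresses : List Int) (speeds : List Int) : List Int :=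
  let days := (progresses.zip speeds).map (fun ps => pvCeilDiv (100 - ps.1) ps.2)
  match PySem.List.pyGet? days 0 with
  | none => []  -- Python raises IndexError at days[0]; excluded by Pre_solution3
  | some d0 =>
    ((PySem.List.pyRange 1 (days.length : Int) 1).foldl
      (fun (st : List Int × Int) i =>
        if PySem.List.pyGetD days i 0 ≤ st.2 then (pvIncLast st.1, st.2)
        else (st.1 ++ [1], PySem.List.pyGetD days i 0))
      ([1], d0)).1

-- ===== PORT B =====
def solution3_alt (progresses : List Int) (speeds : List Int) : List Int :=
  let days := (progresses.zip speeds).map (fun ps => pvCeilDiv (100 - ps.1) ps.2)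
  let running := (days.drop 1).foldl
      (fun run d => run ++ [max (PySem.List.pyGetD run (-1) 0) d]) (days.take 1)
  let starts := (List.range running.length).filter
      (fun i => decide (i = 0) || decide (running.getD (i - 1) 0 < running.getD i 0))
  let bounds := starts.map Int.ofNat ++ [(days.length : Int)]
  (bounds.zip (bounds.drop 1)).map (fun ab => ab.2 - ab.1)

-- ===== PRECONDITION & SPEC =====
-- Pre_ excludes exactly the inputs where Python A raises: an empty progresses or speeds list
-- (IndexError at days[0]) and a zero speed among the zipped pairs (ZeroDivisionError).
def Pre_solution3 (progresses : List Int) (speeds : List Int) : Prop :=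
  progresses ≠ [] ∧ speeds ≠ [] ∧ ∀ s ∈ speeds.take progresses.length, s ≠ 0
instance (progresses : List Int) (speeds : List Int) : Decidable (Pre_solution3 progresses speeds) := by unfold Pre_solution3; infer_instance

def pvWitness_solution3 : List Int × List Int := ([93, 30, 55], [1, 30, 5])

def Spec_solution3 (progresses : List Int) (speeds : List Int) (out : List Int) : Prop := out = solution3_alt progresses speeds
instance (progresses : List Int) (speeds : List Int) (out : List Int) : Decidable (Spec_solution3 progresses speeds out) := by unfold Spec_solution3; infer_instance

-- ===== CLAIM (what is proved, stated in full; the proofs are below) =====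
def Claim_equal_solution3 : Prop := ∀ (progresses : List Int) (speeds : List Int), Dom_solution3 progresses speeds → Pre_solution3 progresses speeds → Spec_solution3 progresses speeds (solution3 progresses speeds)

-- ===== LEMMAS AND PROOFS =====

def pvDays (progresses speeds : List Int) : List Int :=
  (progresses.zip speeds).map (fun ps => pvCeilDiv (100 - ps.1) ps.2)

-- A's loop step over the day values
def pvStep (st : List Int × Int) (d : Int) : List Int × Int :=
  if d ≤ st.2 then (pvIncLast st.1, st.2) else (st.1 ++ [1], d)

-- B's running-max step
def pvRunStep (run : List Int) (d : Int) : List Int :=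
  run ++ [max (PySem.List.pyGetD run (-1) 0) d]

def pvRun (d0 : Int) (r : List Int) : List Int := r.foldl pvRunStep [d0]

def pvStartsOf (running : List Int) : List Nat :=
  (List.range running.length).filter
    (fun i => decide (i = 0) || decide (running.getD (i - 1) 0 < running.getD i 0))

def pvDiffs (l : List Int) : List Int := (l.zip (l.drop 1)).map (fun ab => ab.2 - ab.1)

def pvSizes (n : Nat) (running : List Int) : List Int :=
  pvDiffs ((pvStartsOf running).map Int.ofNat ++ [(n : Int)])

theorem pvA_eq (p s : List Int) (d0 : Int) (rest : List Int)
    (h : pvDays p s = d0 :: rest) :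
    solution3 p s = (rest.foldl pvStep ([1], d0)).1 := by
  unfold solution3
  rw [show (p.zip s).map (fun ps => pvCeilDiv (100 - ps.1) ps.2) = pvDays p s from rfl, h]
  have hget : PySem.List.pyGet? (d0 :: rest) (0 : Int) = some d0 := by
    simp [PySem.List.pyGet?, PySem.List.pyIdx?]
  simp only [hget]
  have hfold := PySem.List.foldl_pyRange_pyGetD' (d0 :: rest) (0 : Int) pvStep
      (([1], d0) : List Int × Int) (a := 1) (by omega)
  simp only [List.drop_succ_cons, List.drop_zero, Int.toNat_one] at hfold
  exact congrArg Prod.fst hfold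

theorem pvAlt_eq (p s : List Int) (d0 : Int) (rest : List Int)
    (h : pvDays p s = d0 :: rest) :
    solution3_alt p s = pvSizes (rest.length + 1) (pvRun d0 rest) := by
  unfold solution3_alt
  rw [show (p.zip s).map (fun ps => pvCeilDiv (100 - ps.1) ps.2) = pvDays p s from rfl, h]
  rfl

theorem pvRun_len_aux (r : List Int) : ∀ init : List Int,
    (r.foldl pvRunStep init).length = init.length + r.length := by
  induction r with
  | nil => intro init; simp
  | cons d r ih => intro init; simp [List.foldl_cons, ih, pvRunStep]; omega

theorem pvRun_length (d0 : Int) (r : List Int) : (pvRun d0 r).length = r.length + 1 := by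
  unfold pvRun; rw [pvRun_len_aux]; simp; omega

theorem pvRun_ne_nil (d0 : Int) (r : List Int) : pvRun d0 r ≠ [] := by
  intro h
  have := pvRun_length d0 r
  rw [h] at this; simp at this

theorem pvRun_last (d0 : Int) (r : List Int) :
    PySem.List.pyGetD (pvRun d0 r) (-1) 0 = r.foldl max d0 := by
  induction r using List.reverseRecOn with
  | nil =>
    rw [pvRun, List.foldl_nil, List.foldl_nil]
    exact PySem.List.pyGetD_neg_one_append_singleton (xs := []) (x := d0) (d := 0)
  | append_singleton r d ih =>
    rw [pvRun, List.foldl_append, List.foldl_append]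
    show PySem.List.pyGetD (pvRunStep (pvRun d0 r) d) (-1) 0 = max (r.foldl max d0) d
    rw [pvRunStep, PySem.List.pyGetD_neg_one_append_singleton, ih]

theorem pvStartsOf_snoc (run : List Int) (hne : run ≠ []) (m : Int) :
    pvStartsOf (run ++ [m]) =
      pvStartsOf run ++ (if run.getLast hne < m then [run.length] else []) := by
  unfold pvStartsOf
  rw [List.length_append, List.length_singleton, List.range_succ, List.filter_append]
  congr 1
  · apply List.filter_congr
    intro i hi
    rw [List.mem_range] at hi
    rw [List.getD_append run [m] 0 i hi, List.getD_append run [m] 0 (i - 1) (by omega)]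
  · have h0 : run.length ≠ 0 := by
      intro h; exact hne (List.eq_nil_of_length_eq_zero h)
    have hgd : (run ++ [m]).getD run.length 0 = m := by
      rw [List.getD_append_right run [m] 0 run.length (le_refl _)]
      simp
    have hgd1 : (run ++ [m]).getD (run.length - 1) 0 = run.getLast hne := by
      rw [List.getD_append run [m] 0 (run.length - 1) (by omega)]
      rw [List.getLast_eq_getElem, List.getD_eq_getElem]
    simp only [List.filter_cons, List.filter_nil]
    rw [hgd, hgd1]
    simp [h0]

theorem pvStartsOf_ne_nil (run : List Int) (hne : run ≠ []) : pvStartsOf run ≠ [] := by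
  have : 0 ∈ pvStartsOf run := by
    unfold pvStartsOf
    rw [List.mem_filter]
    refine ⟨?_, by simp⟩
    rw [List.mem_range]
    cases run with
    | nil => exact absurd rfl hne
    | cons a t => simp
  exact List.ne_nil_of_mem this

theorem pvDiffs_cons_cons (x y : Int) (l : List Int) :
    pvDiffs (x :: y :: l) = (y - x) :: pvDiffs (y :: l) := rfl

theorem pvDiffs_length (l : List Int) : (pvDiffs l).length = l.length - 1 := by
  simp [pvDiffs]

theorem pvIncLast_cons_of_ne (a : Int) (l : List Int) (h : l ≠ []) :
    pvIncLast (a :: l) = a :: pvIncLast l := by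
  cases l with
  | nil => exact absurd rfl h
  | cons y t => rfl

theorem pvDiffs_snoc2 (xs : List Int) (a b : Int) :
    pvDiffs (xs ++ [a, b]) = pvDiffs (xs ++ [a]) ++ [b - a] := by
  induction xs with
  | nil => rfl
  | cons x xs ih =>
    cases xs with
    | nil => rfl
    | cons y t =>
      simp only [List.cons_append]
      rw [pvDiffs_cons_cons, pvDiffs_cons_cons]
      simp only [List.cons_append] at ih
      rw [ih]
      simp

theorem pvDiffs_incLast (xs : List Int) (hx : xs ≠ []) (c : Int) :
    pvDiffs (xs ++ [c + 1]) = pvIncLast (pvDiffs (xs ++ [c])) := by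
  induction xs with
  | nil => exact absurd rfl hx
  | cons x xs ih =>
    cases xs with
    | nil =>
      show [c + 1 - x] = [c - x + 1]
      congr 1; ring
    | cons y t =>
      simp only [List.cons_append]
      rw [pvDiffs_cons_cons, pvDiffs_cons_cons]
      have ih' := ih (by simp)
      simp only [List.cons_append] at ih'
      rw [ih', pvIncLast_cons_of_ne]
      intro h
      have := congrArg List.length h
      rw [pvDiffs_length] at this
      simp at this

theorem pvMain (d0 : Int) (r : List Int) :
    r.foldl pvStep ([1], d0) = (pvSizes (r.length + 1) (pvRun d0 r), r.foldl max d0) := by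
  induction r using List.reverseRecOn with
  | nil => simp [pvRun, pvSizes, pvStartsOf, pvDiffs]
  | append_singleton r d ih =>
    have hne : pvRun d0 r ≠ [] := pvRun_ne_nil d0 r
    have hlast : (pvRun d0 r).getLast hne = r.foldl max d0 := by
      have := pvRun_last d0 r
      rwa [PySem.List.pyGetD_neg_one (pvRun d0 r) 0 hne] at this
    have hrun : pvRun d0 (r ++ [d]) = pvRun d0 r ++ [max (r.foldl max d0) d] := by
      rw [pvRun, List.foldl_append]
      show pvRunStep (pvRun d0 r) d = _
      rw [pvRunStep, pvRun_last]
    have hS : (pvStartsOf (pvRun d0 r)).map Int.ofNat ≠ [] := by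
      simp [pvStartsOf_ne_nil (pvRun d0 r) hne]
    have hlen2 : ((r ++ [d]).length + 1 : Nat) = r.length + 1 + 1 := by simp
    have hcast : ((r.length + 1 + 1 : Nat) : Int) = ((r.length + 1 : Nat) : Int) + 1 := by
      push_cast; ring
    rw [List.foldl_append, List.foldl_append, List.foldl_cons, List.foldl_nil,
        List.foldl_cons, List.foldl_nil, ih, hrun]
    by_cases hM : d ≤ r.foldl max d0
    · have hmax : max (r.foldl max d0) d = r.foldl max d0 := max_eq_left hM
      have hst : pvStartsOf (pvRun d0 r ++ [r.foldl max d0]) = pvStartsOf (pvRun d0 r) := by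
        rw [pvStartsOf_snoc (pvRun d0 r) hne, hlast, if_neg (lt_irrefl _)]
        simp
      rw [hmax, pvStep]
      simp only [hM, if_pos]
      simp only [pvSizes]
      rw [hst, hlen2, hcast, pvDiffs_incLast _ hS ((r.length + 1 : Nat) : Int)]
    · have hlt : r.foldl max d0 < d := lt_of_not_ge hM
      have hmax : max (r.foldl max d0) d = d := max_eq_right (le_of_lt hlt)
      have hst : pvStartsOf (pvRun d0 r ++ [d]) =
          pvStartsOf (pvRun d0 r) ++ [(pvRun d0 r).length] := by
        rw [pvStartsOf_snoc (pvRun d0 r) hne, hlast, if_pos hlt]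
      rw [hmax, pvStep]
      simp only [not_le.mpr hlt, if_false]
      simp only [pvSizes]
      rw [hst, hlen2, hcast, List.map_append, pvRun_length]
      have hone : (([(r.length + 1 : Nat)].map Int.ofNat) : List Int)
          = [((r.length + 1 : Nat) : Int)] := by simp
      rw [hone, List.append_assoc]
      have hl : ([((r.length + 1 : Nat) : Int)] ++ [((r.length + 1 : Nat) : Int) + 1])
          = [((r.length + 1 : Nat) : Int), ((r.length + 1 : Nat) : Int) + 1] := by simp
      rw [hl, pvDiffs_snoc2]
      have : ((r.length + 1 : Nat) : Int) + 1 - ((r.length + 1 : Nat) : Int) = 1 := by ring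
      rw [this]

-- ===== VERDICT (by name: the statement is the Claim_ definition above) =====
theorem solution3_spec : Claim_equal_solution3 := by
  intro p s _hdom hpre
  unfold Spec_solution3
  have hz : pvDays p s ≠ [] := by
    unfold pvDays
    intro hnil
    rcases hpre with ⟨hp, hs, -⟩
    have : (p.zip s).length = 0 := by
      simpa using congrArg List.length hnil
    rw [List.length_zip] at this
    rcases p with _ | ⟨a, p'⟩; · exact hp rfl
    rcases s with _ | ⟨b, s'⟩; · exact hs rfl
    simp at this
  rcases hd : pvDays p s with _ | ⟨d0, rest⟩
  · exact absurd hd hz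
  · rw [pvA_eq p s d0 rest hd, pvAlt_eq p s d0 rest hd, pvMain]
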